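-- pv_equiv track=rewrite | github.com/Sealgram/WordSearch | Main.py | numberlist
-- ===== SOURCE A (Python) =====
-- def numberlist(sidelength, positive, negative):
--     # Function is defined with necessary parameters
--     listofnums = []
--     # empty listofnums is defined
--     y = 0
--     # y is defined as zero, to be changed with each loop through the function
--     for x in range(0, sidelength):
--         # uses the size of the table as the first range repeat
--         for l in range(0, positive):
--             # uses the second parameter, positive, as the second range repeat
--             listofnums.append(y)
--             # appends the y value to the listofnums
--             y += 1
--             # brings the y value up with each loop
--         y += negative
--         # skips the values that are not allowed to be inserted in the list, then runs through the loop again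
--     return listofnums
-- ===== SOURCE B (Python) =====
-- def numberlist(sidelength, positive, negative):
--     # Each entry is computed from its coordinates (x, l) by closed-form
--     # index arithmetic: row x starts at x*(positive+negative).
--     listofnums = []
--     for x in range(sidelength):
--         for l in range(positive):
--             listofnums.append(x * (positive + negative) + l)
--     return listofnums
-- ===== Notes on version B (the rewrite author's own statement) =====
-- stated objective: alternative
-- what changed: Eliminates the cross-iteration accumulator y: each element is computed directly from its row/column coordinates as x*(positive+negative)+l.
import Mathlib
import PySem

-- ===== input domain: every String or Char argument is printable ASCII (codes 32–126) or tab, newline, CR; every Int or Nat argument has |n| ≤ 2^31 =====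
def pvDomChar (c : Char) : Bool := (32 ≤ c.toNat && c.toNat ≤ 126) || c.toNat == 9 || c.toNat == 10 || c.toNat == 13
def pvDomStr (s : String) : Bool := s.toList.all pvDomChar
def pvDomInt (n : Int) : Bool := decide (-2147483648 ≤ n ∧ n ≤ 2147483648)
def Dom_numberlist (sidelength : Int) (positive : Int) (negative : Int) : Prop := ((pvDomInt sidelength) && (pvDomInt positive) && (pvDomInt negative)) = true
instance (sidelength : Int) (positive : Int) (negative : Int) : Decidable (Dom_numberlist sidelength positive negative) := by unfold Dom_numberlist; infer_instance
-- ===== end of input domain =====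

-- B eliminates A's cross-iteration accumulator y: each element is computed
-- from its coordinates as x*(positive+negative)+l (objective: alternative).

-- ===== PORT A =====
-- A keeps a running counter y threaded through both loops; state = (listofnums, y).
def numberlist (sidelength : Int) (positive : Int) (negative : Int) : List Int :=
  ((PySem.List.pyRange 0 sidelength 1).foldl
    (fun (st : List Int × Int) _x =>
      let st2 := (PySem.List.pyRange 0 positive 1).foldl
        (fun (st : List Int × Int) _l => (st.1 ++ [st.2], st.2 + 1)) st
      (st2.1, st2.2 + negative))
    ([], 0)).1

-- ===== PORT B =====
-- B: nested loops over the same ranges, but each value is closed-form index arithmetic.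
def numberlist_alt (sidelength : Int) (positive : Int) (negative : Int) : List Int :=
  (PySem.List.pyRange 0 sidelength 1).foldl
    (fun acc x =>
      (PySem.List.pyRange 0 positive 1).foldl
        (fun acc l => acc ++ [x * (positive + negative) + l]) acc)
    []

-- ===== PRECONDITION & SPEC =====
def Spec_numberlist (sidelength : Int) (positive : Int) (negative : Int) (out : List Int) : Prop := out = numberlist_alt sidelength positive negative
instance (sidelength : Int) (positive : Int) (negative : Int) (out : List Int) : Decidable (Spec_numberlist sidelength positive negative out) := by unfold Spec_numberlist; infer_instance

-- ===== CLAIM (what is proved, stated in full; the proofs are below) =====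
def Claim_equal_numberlist : Prop := ∀ (sidelength : Int) (positive : Int) (negative : Int), Dom_numberlist sidelength positive negative → Spec_numberlist sidelength positive negative (numberlist sidelength positive negative)

-- ===== LEMMAS AND PROOFS =====

-- A's inner loop: appends y, y+1, … and advances y by the loop length (element ignored).
theorem innerA (xs : List Int) (acc : List Int) (y : Int) :
    xs.foldl (fun (st : List Int × Int) _l => (st.1 ++ [st.2], st.2 + 1)) (acc, y)
      = (acc ++ (List.range xs.length).map (fun k : Nat => y + (k : Int)), y + xs.length) := by
  induction xs generalizing acc y with
  | nil => simp
  | cons h t ih =>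
    simp only [List.foldl_cons, ih, List.length_cons]
    rw [Prod.mk.injEq]
    constructor
    · rw [List.range_succ_eq_map, List.map_cons, List.map_map, List.append_assoc,
        List.singleton_append]
      congr 1
      congr 1
      · simp
      · refine List.map_congr_left ?_
        intro k _
        show y + 1 + (k : Int) = y + ((k + 1 : Nat) : Int)
        push_cast; ring
    · push_cast; ring

-- B's inner loop is a map appended to the accumulator.
theorem innerB {α : Type} (xs : List α) (f : α → Int) (acc : List Int) :
    xs.foldl (fun acc l => acc ++ [f l]) acc = acc ++ xs.map f := by
  induction xs generalizing acc with
  | nil => simp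
  | cons h t ih => simp [ih]

-- Outer loop correspondence (positive > 0): A's state after rows a..b from y = a*(p+n)
-- equals B's accumulator, with y = b*(p+n) at the end.
theorem outer_loop (p n : Int) (hp : 0 < p) :
    ∀ (k : Nat) (a b : Int), a ≤ b → (b - a).toNat = k → ∀ (acc : List Int),
    (PySem.List.pyRange a b 1).foldl
      (fun (st : List Int × Int) _x =>
        ((st.1 ++ (List.range (PySem.List.pyRange 0 p 1).length).map
            (fun k : Nat => st.2 + (k : Int)), st.2 + (PySem.List.pyRange 0 p 1).length)
          : List Int × Int).map id (fun y => y + n))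
      (acc, a * (p + n))
    = ((PySem.List.pyRange a b 1).foldl
        (fun acc x => acc ++ (PySem.List.pyRange 0 p 1).map
          (fun l => x * (p + n) + l)) acc, b * (p + n)) := by
  intro k
  induction k with
  | zero =>
    intro a b hab h0 acc
    have : a = b := by omega
    subst this
    simp [PySem.List.pyRange_one_eq_nil le_rfl]
  | succ k ih =>
    intro a b hab hk acc
    have hlt : a < b := by omega
    rw [PySem.List.pyRange_one_cons hlt]
    simp only [List.foldl_cons]
    have hlen : ((PySem.List.pyRange 0 p 1).length : Int) = p := by
      rw [PySem.List.length_pyRange_one]; omega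
    have hy : a * (p + n) + ((PySem.List.pyRange 0 p 1).length : Int) + n = (a + 1) * (p + n) := by
      rw [hlen]; ring
    have hrange : (List.range (PySem.List.pyRange 0 p 1).length).map
        (fun k : Nat => a * (p + n) + (k : Int))
        = (PySem.List.pyRange 0 p 1).map (fun l => a * (p + n) + l) := by
      rw [PySem.List.length_pyRange_one, PySem.List.pyRange_one, List.map_map]
      refine List.map_congr_left ?_
      intro k _
      simp [Function.comp]
    simp only [Prod.map, id_eq]
    rw [hrange]
    have := ih (a + 1) b (by omega) (by omega)
      (acc ++ (PySem.List.pyRange 0 p 1).map (fun l => a * (p + n) + l))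
    rw [← hy] at this
    exact this

-- For positive ≤ 0 both inner loops are empty: A only moves y, B keeps its accumulator.
theorem fst_foldl_const {α : Type} (xs : List α) (n : Int) :
    ∀ (st : List Int × Int), (xs.foldl (fun (st : List Int × Int) _x => (st.1, st.2 + n)) st).1 = st.1 := by
  induction xs with
  | nil => intro st; rfl
  | cons h t ih => intro st; exact ih _

theorem foldl_id {α : Type} (xs : List α) (init : List Int) :
    xs.foldl (fun acc _x => acc) init = init := by
  induction xs with
  | nil => rfl
  | cons h t ih => exact ih

-- ===== VERDICT (by name: the statement is the Claim_ definition above) =====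
theorem numberlist_spec : Claim_equal_numberlist := by
  intro s p n _
  unfold Spec_numberlist numberlist numberlist_alt
  by_cases hp : p ≤ 0
  · -- inner range empty: A appends nothing (y still moves), B appends nothing
    rw [PySem.List.pyRange_one_eq_nil hp]
    simp only [List.foldl_nil]
    rw [fst_foldl_const, foldl_id]
  · have hp : 0 < p := by omega
    by_cases hs : s ≤ 0
    · rw [PySem.List.pyRange_one_eq_nil hs]
      rfl
    · have key := outer_loop p n hp (s - 0).toNat 0 s (by omega) rfl []
      simp only [Prod.map, id_eq] at key
      have hA : ((PySem.List.pyRange 0 s 1).foldl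
          (fun (st : List Int × Int) _x =>
            let st2 := (PySem.List.pyRange 0 p 1).foldl
              (fun (st : List Int × Int) _l => (st.1 ++ [st.2], st.2 + 1)) st
            (st2.1, st2.2 + n))
          ([], 0))
          = (PySem.List.pyRange 0 s 1).foldl
            (fun (st : List Int × Int) _x =>
              (st.1 ++ (List.range (PySem.List.pyRange 0 p 1).length).map
                (fun k : Nat => st.2 + (k : Int)), st.2 + (PySem.List.pyRange 0 p 1).length + n))
            ([], 0) := by
        refine List.foldl_ext _ _ _ ?_
        intro st x _
        simp only [innerA (PySem.List.pyRange 0 p 1) st.1 st.2]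
      rw [hA]
      have h0 : (0 : Int) = 0 * (p + n) := by ring
      rw [show (([], 0) : List Int × Int) = (([] : List Int), 0 * (p + n)) by rw [← h0]]
      rw [key]
      have hB : (PySem.List.pyRange 0 s 1).foldl
          (fun acc x => (PySem.List.pyRange 0 p 1).foldl
            (fun acc l => acc ++ [x * (p + n) + l]) acc) ([] : List Int)
          = (PySem.List.pyRange 0 s 1).foldl
            (fun acc x => acc ++ (PySem.List.pyRange 0 p 1).map
              (fun l => x * (p + n) + l)) [] := by
        refine List.foldl_ext _ _ _ ?_
        intro acc x _
        exact innerB _ _ acc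
      rw [hB]
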